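-- pv_equiv track=rewrite | github.com/zhyfzy/futils | math.py | min_with_exception
-- ===== SOURCE A (Python) =====
-- def min_with_exception(num_list, execption=-1):
--     """给定一个list数组，求这些数中的最小值。
--     其中数组中的数可能有例外值，如-1或None等，需要排除掉这些例外值"""
--     ret = execption
--     for n in num_list:
--         if n != execption:
--             if ret == execption:
--                 ret = n
--             else:
--                 ret = min(ret, n)
--     return ret
-- ===== SOURCE B (Python) =====
-- def min_with_exception(num_list, execption=-1):
--     vals = [n for n in num_list if n != execption]
--     return min(vals) if vals else execption
-- ===== Notes on version B (the rewrite author's own statement) =====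
-- stated objective: simpler
-- what changed: Replaced the interleaved scalar-accumulator loop (running min with a sentinel check each step) by a two-stage filter-then-reduce: materialize the non-exception values, then one guarded min() call.
import Mathlib
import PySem

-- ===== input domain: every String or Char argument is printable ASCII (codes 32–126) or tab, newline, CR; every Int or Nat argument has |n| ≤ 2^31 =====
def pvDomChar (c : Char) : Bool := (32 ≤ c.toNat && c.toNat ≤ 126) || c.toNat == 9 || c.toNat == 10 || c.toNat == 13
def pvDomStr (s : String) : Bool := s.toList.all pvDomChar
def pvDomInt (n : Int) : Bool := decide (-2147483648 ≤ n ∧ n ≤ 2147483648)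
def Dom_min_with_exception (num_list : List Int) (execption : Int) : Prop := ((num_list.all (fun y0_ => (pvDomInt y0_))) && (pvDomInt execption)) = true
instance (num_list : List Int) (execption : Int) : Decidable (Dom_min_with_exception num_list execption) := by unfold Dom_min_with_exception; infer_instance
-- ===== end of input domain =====

-- B replaces A's sentinel-checking accumulator loop by filter-then-reduce (objective: simpler).

-- ===== PORT A =====
def min_with_exception (num_list : List Int) (execption : Int) : Int :=
  num_list.foldl
    (fun ret n =>
      if n ≠ execption then
        if ret = execption then n else min ret n
      else ret)
    execption

-- ===== PORT B =====
def min_with_exception_alt (num_list : List Int) (execption : Int) : Int :=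
  let vals := num_list.filter (fun n => n ≠ execption)
  match vals with
  | [] => execption
  | h :: t => t.foldl min h     -- Python min() over a nonempty list

-- ===== PRECONDITION & SPEC =====
def Spec_min_with_exception (num_list : List Int) (execption : Int) (out : Int) : Prop := out = min_with_exception_alt num_list execption
instance (num_list : List Int) (execption : Int) (out : Int) : Decidable (Spec_min_with_exception num_list execption out) := by unfold Spec_min_with_exception; infer_instance

-- ===== CLAIM (what is proved, stated in full; the proofs are below) =====
def Claim_equal_min_with_exception : Prop := ∀ (num_list : List Int) (execption : Int), Dom_min_with_exception num_list execption → Spec_min_with_exception num_list execption (min_with_exception num_list execption)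

-- ===== LEMMAS AND PROOFS =====

-- Once the accumulator is a real value (≠ execption), A's loop is a plain min-fold over the filtered tail.
theorem loopA_of_ne (l : List Int) (e r : Int) (hr : r ≠ e) :
    l.foldl (fun ret n => if n ≠ e then (if ret = e then n else min ret n) else ret) r
      = (l.filter (fun n => n ≠ e)).foldl min r := by
  induction l generalizing r with
  | nil => rfl
  | cons n l ih =>
    by_cases hn : n = e
    · rw [List.foldl_cons, if_neg (by simp [hn]),
        List.filter_cons_of_neg (by simp [hn])]
      exact ih r hr
    · have hmin : min r n ≠ e := by
        rcases min_choice r n with h | h <;> rw [h] <;> [exact hr; exact hn]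
      rw [List.foldl_cons, if_pos hn, if_neg hr,
        List.filter_cons_of_pos (by simp [hn]), List.foldl_cons]
      exact ih (min r n) hmin

theorem min_with_exception_eq (l : List Int) (e : Int) :
    min_with_exception l e = min_with_exception_alt l e := by
  unfold min_with_exception min_with_exception_alt
  induction l with
  | nil => rfl
  | cons n l ih =>
    by_cases hn : n = e
    · rw [List.foldl_cons, if_neg (by simp [hn]), ih,
        List.filter_cons_of_neg (by simp [hn])]
    · rw [List.foldl_cons, if_pos hn, if_pos rfl,
        List.filter_cons_of_pos (by simp [hn])]
      exact loopA_of_ne l e n hn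

-- ===== VERDICT (by name: the statement is the Claim_ definition above) =====
theorem min_with_exception_spec : Claim_equal_min_with_exception := by
  intro l e _
  exact min_with_exception_eq l e
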